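-- pv_equiv track=rewrite | github.com/MurariAmbati/mathematical-systems | music-math-engine/src/math_music_engine/generators/fractal_melody.py | generate_sierpinski_melody
-- ===== SOURCE A (Python) =====
-- from typing import Dict, List, Optional, Any, Tuple
--
-- def generate_sierpinski_melody(
--
--     iterations: int,
--     base_interval: int = 2
-- ) -> List[int]:
--     """
--     Generate melody based on Sierpinski triangle pattern.
--
--     Args:
--         iterations: Number of iterations
--         base_interval: Base interval in semitones
--
--     Returns:
--         List of MIDI note intervals
--     """
--     # Generate Sierpinski triangle as binary pattern
--     def sierpinski_row(n: int) -> List[int]: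
--         if n == 0:
--             return [1]
--
--         prev = sierpinski_row(n - 1)
--         # Each row is previous XOR-ed with shifted version
--         row = prev + [0] + prev
--         return row
--
--     # Convert to melody
--     pattern = sierpinski_row(iterations)
--     melody = [base_interval if x == 1 else 0 for x in pattern]
--
--     return melody
-- ===== SOURCE B (Python) =====
-- def generate_sierpinski_melody(iterations, base_interval=2):
--     # The row recursion prev + [0] + prev yields 1 exactly at even indices,
--     # so compute the total length in closed form and emit the alternating list.
--     L = 2 ** (iterations + 1) - 1
--     return [base_interval if i % 2 == 0 else 0 for i in range(L)]
-- ===== Notes on version B (the rewrite author's own statement) =====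
-- stated objective: simpler
-- what changed: Replaces the recursive Sierpinski-row construction (prev + [0] + prev, then a mapping pass) by the closed form: the pattern is 1 exactly at even indices, so B computes the length 2**(iterations+1)-1 and emits the alternating list in a single comprehension with no helper or recursion.
import Mathlib
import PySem

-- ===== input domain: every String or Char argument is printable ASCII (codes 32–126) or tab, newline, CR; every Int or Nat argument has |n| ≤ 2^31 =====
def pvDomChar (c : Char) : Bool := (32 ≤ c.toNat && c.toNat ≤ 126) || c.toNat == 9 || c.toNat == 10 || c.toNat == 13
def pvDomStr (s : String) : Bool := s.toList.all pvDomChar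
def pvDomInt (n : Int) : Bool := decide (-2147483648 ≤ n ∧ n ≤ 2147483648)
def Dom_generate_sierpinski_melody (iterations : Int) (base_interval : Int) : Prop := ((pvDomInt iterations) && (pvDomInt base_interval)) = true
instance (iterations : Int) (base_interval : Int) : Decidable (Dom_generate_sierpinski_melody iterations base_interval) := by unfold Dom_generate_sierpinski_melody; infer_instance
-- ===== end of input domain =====

-- B changes the algorithm: closed-form alternating list instead of exponential row recursion.
-- For negative `iterations` Python A raises RecursionError; Pre_ restricts to iterations ≥ 0.

-- ===== PORT A =====
-- inner helper sierpinski_row; recursion on the (nonnegative, by Pre_) iteration count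
def pvSierRow : Nat → List Int
  | 0 => [1]
  | n + 1 => pvSierRow n ++ [0] ++ pvSierRow n

def generate_sierpinski_melody (iterations : Int) (base_interval : Int) : List Int :=
  -- exact for iterations ≥ 0 (Pre_); Python recurses without bound for negative iterations
  ((pvSierRow iterations.toNat).map (fun x => if x == 1 then base_interval else 0))

-- ===== PORT B =====
def generate_sierpinski_melody_alt (iterations : Int) (base_interval : Int) : List Int :=
  -- L = 2**(iterations+1) - 1; exact for iterations ≥ -1
  let L : Int := 2 ^ ((iterations + 1).toNat) - 1
  (PySem.List.pyRange 0 L 1).map (fun i => if i % 2 == 0 then base_interval else 0)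

-- ===== PRECONDITION & SPEC =====
-- Pre_ excludes negative iterations, on which Python A raises RecursionError.
def Pre_generate_sierpinski_melody (iterations : Int) (base_interval : Int) : Prop :=
  0 ≤ iterations
instance (iterations : Int) (base_interval : Int) : Decidable (Pre_generate_sierpinski_melody iterations base_interval) := by unfold Pre_generate_sierpinski_melody; infer_instance

def pvWitness_generate_sierpinski_melody : Int × Int := (3, 2)

def Spec_generate_sierpinski_melody (iterations : Int) (base_interval : Int) (out : List Int) : Prop := out = generate_sierpinski_melody_alt iterations base_interval
instance (iterations : Int) (base_interval : Int) (out : List Int) : Decidable (Spec_generate_sierpinski_melody iterations base_interval out) := by unfold Spec_generate_sierpinski_melody; infer_instance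

-- ===== CLAIM (what is proved, stated in full; the proofs are below) =====
def Claim_equal_generate_sierpinski_melody : Prop := ∀ (iterations : Int) (base_interval : Int), Dom_generate_sierpinski_melody iterations base_interval → Pre_generate_sierpinski_melody iterations base_interval → Spec_generate_sierpinski_melody iterations base_interval (generate_sierpinski_melody iterations base_interval)

-- ===== LEMMAS AND PROOFS =====

-- the melody of row n is the alternating list of length 2^(n+1) - 1
lemma pvRow_map_eq (bi : Int) : ∀ n : Nat,
    (pvSierRow n).map (fun x => if x == 1 then bi else 0)
      = (List.range (2 ^ (n + 1) - 1)).map (fun k : Nat => if (k : Int) % 2 == 0 then bi else 0) := by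
  intro n
  induction n with
  | zero => simp [pvSierRow]
  | succ n ih =>
      have hone : 1 ≤ 2 ^ (n + 1) := Nat.one_le_two_pow
      set L : Nat := 2 ^ (n + 1) - 1 with hLdef
      have hL : 2 ^ (n + 1 + 1) - 1 = L + (1 + L) := by
        have : 2 ^ (n + 1 + 1) = 2 * 2 ^ (n + 1) := by ring
        omega
      have hLpar : L % 2 = 1 := by
        have : 2 ^ (n + 1) = 2 * 2 ^ n := by ring
        omega
      rw [hL, List.range_add, List.range_add, List.map_append, List.map_append, List.map_map,
        List.map_append, List.map_map, List.map_map]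
      simp only [pvSierRow, List.map_append, ih]
      have h0 : (List.range 1).map ((fun k : Nat => if (k : Int) % 2 == 0 then bi else 0) ∘ (L + ·))
          = [(0:Int)] := by
        simp [Function.comp]
        intro h
        omega
      have h1 : (List.range L).map ((fun k : Nat => if (k : Int) % 2 == 0 then bi else 0) ∘ ((L + ·) ∘ (1 + ·)))
          = (List.range L).map (fun k : Nat => if (k : Int) % 2 == 0 then bi else 0) := by
        apply List.map_congr_left
        intro j _
        simp only [Function.comp]
        congr 1
        have : ((L + (1 + j) : Nat) : Int) % 2 = ((j : Nat) : Int) % 2 := by push_cast; omega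
        rw [this]
      rw [h0, h1]
      simp

theorem generate_sierpinski_melody_spec : Claim_equal_generate_sierpinski_melody := by
  intro it bi _ hpre
  unfold Pre_generate_sierpinski_melody at hpre
  unfold Spec_generate_sierpinski_melody generate_sierpinski_melody generate_sierpinski_melody_alt
  have hn : (it + 1).toNat = it.toNat + 1 := by omega
  have hNat : ((2 : Int) ^ (it.toNat + 1) - 1 - 0).toNat = 2 ^ (it.toNat + 1) - 1 := by
    have hc : ((2 ^ (it.toNat + 1) : Nat) : Int) = (2:Int) ^ (it.toNat + 1) := by push_cast; ring
    have h1 : 1 ≤ 2 ^ (it.toNat + 1) := Nat.one_le_two_pow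
    omega
  rw [pvRow_map_eq bi it.toNat]
  simp only [hn, PySem.List.pyRange_one, List.map_map, hNat]
  apply List.map_congr_left
  intro j _
  simp [Function.comp]
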